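-- pv_equiv track=rewrite | github.com/Dekonu/data-dialysis | src/adapters/csv_ingester.py | _auto_detect_column_mapping
-- ===== SOURCE A (Python) =====
-- from typing import Iterator, Optional, Dict, Any, List, Union
--
-- def _auto_detect_column_mapping(headers: List[str]) -> Dict[str, str]:
--     """Auto-detect column mapping from CSV headers.
--
--     This method attempts to match CSV column names to domain model fields
--     using common naming patterns and case-insensitive matching.
--
--     Parameters:
--         headers: List of CSV column names from header row
--
--     Returns:
--         dict: Mapping from domain model fields to CSV column names
--     """
--     mapping = {}
--
--     # Common field name variations
--     field_variations = {
--         'patient_id': ['patient_id', 'patientid', 'mrn', 'medical_record_number', 'id', 'record_id'],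
--         'first_name': ['first_name', 'firstname', 'fname', 'given_name', 'givenname'],
--         'last_name': ['last_name', 'lastname', 'lname', 'family_name', 'familyname', 'surname'],
--         'date_of_birth': ['date_of_birth', 'dateofbirth', 'dob', 'birth_date', 'birthdate'],
--         'gender': ['gender', 'sex'],
--         'ssn': ['ssn', 'social_security_number', 'socialsecuritynumber'],
--         'phone': ['phone', 'phone_number', 'phonenumber', 'telephone', 'tel'],
--         'email': ['email', 'email_address', 'emailaddress'],
--         'address_line1': ['address', 'address_line1', 'addressline1', 'street', 'street_address'],
--         'city': ['city'],
--         'state': ['state', 'state_code', 'statecode'],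
--         'postal_code': ['postal_code', 'postalcode', 'zip', 'zip_code', 'zipcode'],
--     }
--
--     # Normalize headers (lowercase, strip)
--     normalized_headers = {h.lower().strip(): h for h in headers}
--
--     # Match headers to domain fields
--     for domain_field, variations in field_variations.items():
--         for variation in variations:
--             if variation.lower() in normalized_headers:
--                 mapping[domain_field] = normalized_headers[variation.lower()]
--                 break
--
--     return mapping
-- ===== SOURCE B (Python) =====
-- from typing import List, Dict
--
-- # Reverse index: normalized variation -> (domain field, priority within that field's list).
-- _REV = {
--     'patient_id': ('patient_id', 0),
--     'patientid': ('patient_id', 1),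
--     'mrn': ('patient_id', 2),
--     'medical_record_number': ('patient_id', 3),
--     'id': ('patient_id', 4),
--     'record_id': ('patient_id', 5),
--     'first_name': ('first_name', 0),
--     'firstname': ('first_name', 1),
--     'fname': ('first_name', 2),
--     'given_name': ('first_name', 3),
--     'givenname': ('first_name', 4),
--     'last_name': ('last_name', 0),
--     'lastname': ('last_name', 1),
--     'lname': ('last_name', 2),
--     'family_name': ('last_name', 3),
--     'familyname': ('last_name', 4),
--     'surname': ('last_name', 5),
--     'date_of_birth': ('date_of_birth', 0),
--     'dateofbirth': ('date_of_birth', 1),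
--     'dob': ('date_of_birth', 2),
--     'birth_date': ('date_of_birth', 3),
--     'birthdate': ('date_of_birth', 4),
--     'gender': ('gender', 0),
--     'sex': ('gender', 1),
--     'ssn': ('ssn', 0),
--     'social_security_number': ('ssn', 1),
--     'socialsecuritynumber': ('ssn', 2),
--     'phone': ('phone', 0),
--     'phone_number': ('phone', 1),
--     'phonenumber': ('phone', 2),
--     'telephone': ('phone', 3),
--     'tel': ('phone', 4),
--     'email': ('email', 0),
--     'email_address': ('email', 1),
--     'emailaddress': ('email', 2),
--     'address': ('address_line1', 0),
--     'address_line1': ('address_line1', 1),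
--     'addressline1': ('address_line1', 2),
--     'street': ('address_line1', 3),
--     'street_address': ('address_line1', 4),
--     'city': ('city', 0),
--     'state': ('state', 0),
--     'state_code': ('state', 1),
--     'statecode': ('state', 2),
--     'postal_code': ('postal_code', 0),
--     'postalcode': ('postal_code', 1),
--     'zip': ('postal_code', 2),
--     'zip_code': ('postal_code', 3),
--     'zipcode': ('postal_code', 4),
-- }
--
-- _FIELDS = ['patient_id', 'first_name', 'last_name', 'date_of_birth', 'gender', 'ssn',
--            'phone', 'email', 'address_line1', 'city', 'state', 'postal_code']
--
--
-- def _auto_detect_column_mapping(headers: List[str]) -> Dict[str, str]: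
--     # Single pass over the headers themselves: for each header whose normalized
--     # form is a known variation, keep the match of smallest priority; on an equal
--     # priority (i.e. the same normalized key seen again) the later header wins,
--     # reproducing the last-wins semantics of A's normalized-header dict.
--     best = {}
--     for h in headers:
--         hit = _REV.get(h.lower().strip())
--         if hit is not None:
--             field, idx = hit
--             if field not in best or idx <= best[field][0]:
--                 best[field] = (idx, h)
--     return {field: best[field][1] for field in _FIELDS if field in best}
-- ===== Notes on version B (the rewrite author's own statement) =====
-- stated objective: alternative
-- what changed: Replaces A's normalized-header dict plus nested field-by-variation scan with a precomputed reverse index variation->(field,priority) and a single pass over the headers keeping, per field, the smallest-priority match (later header wins on the same priority), then emitting fields in table order.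
import Mathlib
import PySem

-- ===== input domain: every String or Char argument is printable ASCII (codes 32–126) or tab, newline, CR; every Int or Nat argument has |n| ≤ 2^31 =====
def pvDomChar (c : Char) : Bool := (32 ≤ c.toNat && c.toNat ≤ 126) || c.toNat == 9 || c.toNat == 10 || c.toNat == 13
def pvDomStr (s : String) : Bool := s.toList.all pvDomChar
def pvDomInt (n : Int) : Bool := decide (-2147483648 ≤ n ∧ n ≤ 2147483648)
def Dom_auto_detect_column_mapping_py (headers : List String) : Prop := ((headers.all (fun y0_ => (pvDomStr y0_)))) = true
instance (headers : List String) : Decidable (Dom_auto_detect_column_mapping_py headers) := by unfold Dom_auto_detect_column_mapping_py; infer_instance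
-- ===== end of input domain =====

-- B replaces A's normalized-header dict plus nested field-by-variation scan with a
-- precomputed reverse index variation -> (field, priority) and a single pass over the
-- headers keeping, per field, the smallest-priority match (later header wins on a tie);
-- an alternative decomposition of the same cost.


-- h.lower().strip(), the normalization both Pythons apply to a header
def pvKey (h : String) : String := PySem.Str.strip (PySem.Str.lower h)

-- ===== PORT A =====
-- the literal field_variations table of A
def pvTable : List (String × List String) :=
  [("patient_id", ["patient_id", "patientid", "mrn", "medical_record_number", "id", "record_id"]),
   ("first_name", ["first_name", "firstname", "fname", "given_name", "givenname"]),
   ("last_name", ["last_name", "lastname", "lname", "family_name", "familyname", "surname"]),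
   ("date_of_birth", ["date_of_birth", "dateofbirth", "dob", "birth_date", "birthdate"]),
   ("gender", ["gender", "sex"]),
   ("ssn", ["ssn", "social_security_number", "socialsecuritynumber"]),
   ("phone", ["phone", "phone_number", "phonenumber", "telephone", "tel"]),
   ("email", ["email", "email_address", "emailaddress"]),
   ("address_line1", ["address", "address_line1", "addressline1", "street", "street_address"]),
   ("city", ["city"]),
   ("state", ["state", "state_code", "statecode"]),
   ("postal_code", ["postal_code", "postalcode", "zip", "zip_code", "zipcode"])]

-- {h.lower().strip(): h for h in headers}
def pvNormDict (headers : List String) : PySem.Dict String String :=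
  headers.foldl (fun d h => d.insert (pvKey h) h) PySem.Dict.empty

-- the inner 'for variation in variations: … break' loop of A
def pvFirstVar (n : PySem.Dict String String) : List String → Option String
  | [] => none
  | v :: rest =>
      if n.contains (PySem.Str.lower v) then some (n.getD (PySem.Str.lower v) "")
      else pvFirstVar n rest

def auto_detect_column_mapping_py (headers : List String) : List (String × String) :=
  let normalized := pvNormDict headers
  (pvTable.foldl (fun mapping fv =>
      match pvFirstVar normalized fv.2 with
      | some s => mapping.insert fv.1 s
      | none => mapping) PySem.Dict.empty).items

-- ===== PORT B =====
-- B's module-level literal reverse index _REV: variation -> (field, priority)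
def pvRevB : PySem.Dict String (String × Int) := PySem.Dict.ofList [
  ("patient_id", ("patient_id", 0)),
  ("patientid", ("patient_id", 1)),
  ("mrn", ("patient_id", 2)),
  ("medical_record_number", ("patient_id", 3)),
  ("id", ("patient_id", 4)),
  ("record_id", ("patient_id", 5)),
  ("first_name", ("first_name", 0)),
  ("firstname", ("first_name", 1)),
  ("fname", ("first_name", 2)),
  ("given_name", ("first_name", 3)),
  ("givenname", ("first_name", 4)),
  ("last_name", ("last_name", 0)),
  ("lastname", ("last_name", 1)),
  ("lname", ("last_name", 2)),
  ("family_name", ("last_name", 3)),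
  ("familyname", ("last_name", 4)),
  ("surname", ("last_name", 5)),
  ("date_of_birth", ("date_of_birth", 0)),
  ("dateofbirth", ("date_of_birth", 1)),
  ("dob", ("date_of_birth", 2)),
  ("birth_date", ("date_of_birth", 3)),
  ("birthdate", ("date_of_birth", 4)),
  ("gender", ("gender", 0)),
  ("sex", ("gender", 1)),
  ("ssn", ("ssn", 0)),
  ("social_security_number", ("ssn", 1)),
  ("socialsecuritynumber", ("ssn", 2)),
  ("phone", ("phone", 0)),
  ("phone_number", ("phone", 1)),
  ("phonenumber", ("phone", 2)),
  ("telephone", ("phone", 3)),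
  ("tel", ("phone", 4)),
  ("email", ("email", 0)),
  ("email_address", ("email", 1)),
  ("emailaddress", ("email", 2)),
  ("address", ("address_line1", 0)),
  ("address_line1", ("address_line1", 1)),
  ("addressline1", ("address_line1", 2)),
  ("street", ("address_line1", 3)),
  ("street_address", ("address_line1", 4)),
  ("city", ("city", 0)),
  ("state", ("state", 0)),
  ("state_code", ("state", 1)),
  ("statecode", ("state", 2)),
  ("postal_code", ("postal_code", 0)),
  ("postalcode", ("postal_code", 1)),
  ("zip", ("postal_code", 2)),
  ("zip_code", ("postal_code", 3)),
  ("zipcode", ("postal_code", 4))]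

-- B's module-level _FIELDS list
def pvFields : List String :=
  ["patient_id", "first_name", "last_name", "date_of_birth", "gender", "ssn",
   "phone", "email", "address_line1", "city", "state", "postal_code"]

-- the body of B's single 'for h in headers' loop
def pvStepB (b : PySem.Dict String (Int × String)) (h : String) :
    PySem.Dict String (Int × String) :=
  match pvRevB.get? (pvKey h) with
  | some fi =>
      match b.get? fi.1 with
      | some jw => if fi.2 ≤ jw.1 then b.insert fi.1 (fi.2, h) else b
      | none => b.insert fi.1 (fi.2, h)
  | none => b

def auto_detect_column_mapping_py_alt (headers : List String) : List (String × String) :=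
  let best := headers.foldl pvStepB PySem.Dict.empty
  (pvFields.foldl (fun m f =>
      match best.get? f with
      | some iw => m.insert f iw.2
      | none => m) PySem.Dict.empty).items

-- ===== PRECONDITION & SPEC =====
def Spec_auto_detect_column_mapping_py (headers : List String) (out : List (String × String)) : Prop := out = auto_detect_column_mapping_py_alt headers
instance (headers : List String) (out : List (String × String)) : Decidable (Spec_auto_detect_column_mapping_py headers out) := by unfold Spec_auto_detect_column_mapping_py; infer_instance

-- ===== CLAIM (what is proved, stated in full; the proofs are below) =====
def Claim_equal_auto_detect_column_mapping_py : Prop := ∀ (headers : List String), Dom_auto_detect_column_mapping_py headers → Spec_auto_detect_column_mapping_py headers (auto_detect_column_mapping_py headers)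

-- ===== LEMMAS AND PROOFS =====

-- per-field view of B's loop body: what pvStepB does to the entry of a single field
def pvStep1 (o : Option (Int × String)) (q : Int × String) : Option (Int × String) :=
  match o with
  | none => some q
  | some jw => if q.1 ≤ jw.1 then some q else o

-- B's loop restricted to field f: one step, then the structural loop
def pvStepV (f : String) (o : Option (Int × String)) (h : String) : Option (Int × String) :=
  match pvRevB.get? (pvKey h) with
  | some fi => if fi.1 = f then pvStep1 o (fi.2, h) else o
  | none => o

def pvView (f : String) (hs : List String) (o : Option (Int × String)) : Option (Int × String) :=
  match hs with
  | [] => o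
  | h :: t => pvView f t (pvStepV f o h)

-- table facts (decided on the literal tables)
set_option maxRecDepth 40000 in
lemma pv_lower_var : ∀ fv ∈ pvTable, ∀ v ∈ fv.2, PySem.Str.lower v = v := by decide

set_option maxRecDepth 40000 in
lemma pv_table_fun : ∀ fv ∈ pvTable, ∀ fv' ∈ pvTable, fv.1 = fv'.1 → fv = fv' := by decide

set_option maxRecDepth 40000 in
lemma pv_vars_nodup : ∀ fv ∈ pvTable, fv.2.Nodup := by decide

set_option maxRecDepth 40000 in
lemma pv_rev_mem : ∀ p ∈ pvRevB.items, ∃ fv ∈ pvTable,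
    p.2.1 = fv.1 ∧ p.1 ∈ fv.2 ∧ p.2.2 = (fv.2.idxOf p.1 : Int) := by decide

set_option maxRecDepth 40000 in
lemma pv_rev_complete : ∀ fv ∈ pvTable, ∀ v ∈ fv.2,
    pvRevB.get? v = some (fv.1, (fv.2.idxOf v : Int)) := by decide

set_option maxRecDepth 40000 in
lemma pv_fields_eq : pvFields = pvTable.map Prod.fst := by decide

-- B's whole loop, viewed at a single field f
lemma pv_view_cons (f : String) (h : String) (hs : List String) (o : Option (Int × String)) :
    pvView f (h :: hs) o = pvView f hs (pvStepV f o h) := by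
  rw [pvView]

-- B's whole loop, viewed at a single field f
lemma pv_get?_foldl_stepB (f : String) :
    ∀ (hs : List String) (b : PySem.Dict String (Int × String)),
      (hs.foldl pvStepB b).get? f = pvView f hs (b.get? f) := by
  intro hs
  induction hs with
  | nil => intro b; rfl
  | cons h hs ih =>
    intro b
    rw [List.foldl_cons, ih, pv_view_cons]
    apply congrArg (pvView f hs)
    unfold pvStepB pvStepV
    rcases hrev : pvRevB.get? (pvKey h) with _ | fi
    · rfl
    · simp only []
      by_cases hf : fi.1 = f
      · subst hf
        rw [if_pos rfl]
        rcases hb : b.get? fi.1 with _ | jw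
        · simp [pvStep1, PySem.Dict.get?_insert_self]
        · simp only [pvStep1]
          by_cases hle : fi.2 ≤ jw.1
          · simp [hle, PySem.Dict.get?_insert_self]
          · simp [hle, hb]
      · have hne : f ≠ fi.1 := fun e => hf e.symm
        rw [if_neg hf]
        rcases hb : b.get? fi.1 with _ | jw
        · rw [PySem.Dict.get?_insert, if_neg hne]
        · by_cases hle : fi.2 ≤ jw.1
          · simp [hle, PySem.Dict.get?_insert, hne]
          · simp [hle]

-- the invariant relating B's per-field state to A's normalized-header dict
def pvInv (hs : List String) (fv : String × List String) : Prop :=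
  match pvView fv.1 hs none with
  | none => ∀ j, (hj : j < fv.2.length) → (pvNormDict hs).contains (fv.2[j]'hj) = false
  | some iw => ∃ (j : Nat) (hj : j < fv.2.length), iw.1 = (j : Int) ∧
      (pvNormDict hs).get? (fv.2[j]'hj) = some iw.2 ∧
      ∀ k, (hk : k < fv.2.length) → k < j → (pvNormDict hs).contains (fv.2[k]'hk) = false

lemma pv_norm_append (hs : List String) (h : String) :
    pvNormDict (hs ++ [h]) = (pvNormDict hs).insert (pvKey h) h := by
  unfold pvNormDict
  rw [List.foldl_append, List.foldl_cons, List.foldl_nil]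

lemma pv_view_append (f : String) (hs : List String) (h : String) (o : Option (Int × String)) :
    pvView f (hs ++ [h]) o = pvStepV f (pvView f hs o) h := by
  induction hs generalizing o with
  | nil => rw [List.nil_append, pv_view_cons]; rfl
  | cons h' t ih =>
    rw [List.cons_append, pv_view_cons, pv_view_cons, ih]

-- a header whose key is no variation of fv leaves fv's invariant untouched
lemma pv_inv_transport (hs : List String) (h : String) (fv : String × List String)
    (hne : ∀ j, (hj : j < fv.2.length) → pvKey h ≠ fv.2[j]'hj)
    (hview : pvView fv.1 (hs ++ [h]) none = pvView fv.1 hs none)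
    (ih : pvInv hs fv) : pvInv (hs ++ [h]) fv := by
  unfold pvInv at ih ⊢
  rw [hview, pv_norm_append]
  rcases hv : pvView fv.1 hs none with _ | iw <;> simp only [hv] at ih ⊢
  · intro j hj
    rw [PySem.Dict.contains_eq_isSome_get?, PySem.Dict.get?_insert,
      if_neg (fun e => hne j hj e.symm), ← PySem.Dict.contains_eq_isSome_get?]
    exact ih j hj
  · obtain ⟨j, hj, h1, h2, h3⟩ := ih
    refine ⟨j, hj, h1, ?_, ?_⟩
    · rw [PySem.Dict.get?_insert, if_neg (fun e => hne j hj e.symm)]; exact h2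
    · intro k hk hkj
      rw [PySem.Dict.contains_eq_isSome_get?, PySem.Dict.get?_insert,
        if_neg (fun e => hne k hk e.symm), ← PySem.Dict.contains_eq_isSome_get?]
      exact h3 k hk hkj

lemma pv_inv_holds (fv : String × List String) (hfv : fv ∈ pvTable) :
    ∀ hs : List String, pvInv hs fv := by
  intro hs
  induction hs using List.reverseRecOn with
  | nil =>
    unfold pvInv pvView pvNormDict
    simp only [List.foldl_nil]
    intro j hj
    simp [PySem.Dict.contains_empty]
  | append_singleton hs h ih =>
    have hnodup := pv_vars_nodup fv hfv
    rcases hrev : pvRevB.get? (pvKey h) with _ | fi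
    -- the key of h is no known variation at all
    · refine pv_inv_transport hs h fv ?_ ?_ ih
      · intro j hj he
        have := pv_rev_complete fv hfv (fv.2[j]'hj) (List.getElem_mem hj)
        rw [← he, hrev] at this
        cases this
      · rw [pv_view_append]; unfold pvStepV; simp only [hrev]
    · by_cases hf : fi.1 = fv.1
      -- h matches a variation of fv, at index i
      · obtain ⟨fv', hfv', hfeq, hvmem, hidx⟩ := pv_rev_mem (pvKey h, fi)
          (PySem.Dict.mem_items_of_get?_eq_some pvRevB hrev)
        have hfveq : fv' = fv := pv_table_fun fv' hfv' fv hfv (by rw [← hfeq]; exact hf)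
        subst hfveq
        set i := fv'.2.idxOf (pvKey h) with hidef
        have hilt : i < fv'.2.length := List.idxOf_lt_length_of_mem hvmem
        have hkey : fv'.2[i]'hilt = pvKey h := List.getElem_idxOf hilt
        have hfi2 : fi.2 = (i : Int) := hidx
        have hne_of_ne : ∀ k, (hk : k < fv'.2.length) → k ≠ i → pvKey h ≠ fv'.2[k]'hk := by
          intro k hk hki he
          exact hki (hnodup.getElem_inj_iff.mp (he.symm.trans hkey.symm))
        unfold pvInv at ih ⊢
        rw [pv_view_append, pv_norm_append]
        unfold pvStepV
        simp only [hrev, if_pos hf]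
        rcases hv : pvView fv'.1 hs none with _ | jw <;> simp only [hv] at ih ⊢
        · -- no previous match for fv: the new state is (i, h)
          simp only [pvStep1]
          refine ⟨i, hilt, by rw [hfi2], ?_, ?_⟩
          · rw [hkey, PySem.Dict.get?_insert_self]
          · intro k hk hki
            rw [PySem.Dict.contains_eq_isSome_get?, PySem.Dict.get?_insert,
              if_neg (fun e => hne_of_ne k hk (Nat.ne_of_lt hki) e.symm),
              ← PySem.Dict.contains_eq_isSome_get?]
            exact ih k hk
        · obtain ⟨j, hj, h1, h2, h3⟩ := ih
          simp only [pvStep1]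
          by_cases hle : fi.2 ≤ jw.1
          · -- new priority i wins (or ties): the new state is (i, h)
            have hij : i ≤ j := by
              rw [hfi2, h1] at hle; exact_mod_cast hle
            simp only [if_pos hle]
            refine ⟨i, hilt, by rw [hfi2], ?_, ?_⟩
            · rw [hkey, PySem.Dict.get?_insert_self]
            · intro k hk hki
              rw [PySem.Dict.contains_eq_isSome_get?, PySem.Dict.get?_insert,
                if_neg (fun e => hne_of_ne k hk (Nat.ne_of_lt hki) e.symm),
                ← PySem.Dict.contains_eq_isSome_get?]
              exact h3 k hk (Nat.lt_of_lt_of_le hki hij)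
          · -- the stored match has strictly smaller priority: state unchanged
            have hji : j < i := by
              rw [hfi2, h1] at hle; exact_mod_cast Int.not_le.mp hle
            simp only [if_neg hle]
            refine ⟨j, hj, h1, ?_, ?_⟩
            · rw [PySem.Dict.get?_insert,
                if_neg (fun e => hne_of_ne j hj (Nat.ne_of_lt hji) e.symm)]
              exact h2
            · intro k hk hkj
              rw [PySem.Dict.contains_eq_isSome_get?, PySem.Dict.get?_insert,
                if_neg (fun e => hne_of_ne k hk (Nat.ne_of_lt (Nat.lt_trans hkj hji)) e.symm),
                ← PySem.Dict.contains_eq_isSome_get?]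
              exact h3 k hk hkj
      -- h matches a variation of ANOTHER field: fv's invariant is untouched
      · refine pv_inv_transport hs h fv ?_ ?_ ih
        · intro j hj he
          have := pv_rev_complete fv hfv (fv.2[j]'hj) (List.getElem_mem hj)
          rw [← he, hrev] at this
          exact hf (congrArg (fun o => (o.getD ("", 0)).1) this)
        · rw [pv_view_append]; unfold pvStepV; simp only [hrev, if_neg hf]

-- A's inner loop: nothing matches / least matching variation (characterizations)
lemma pv_firstVar_none (n : PySem.Dict String String) :
    ∀ vs : List String, (∀ v ∈ vs, PySem.Str.lower v = v) →
      (∀ v ∈ vs, n.contains v = false) → pvFirstVar n vs = none := by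
  intro vs
  induction vs with
  | nil => intro _ _; rfl
  | cons v vs ih =>
    intro hlow hc
    have hv := hlow v (by simp)
    simp only [pvFirstVar, hv, hc v (by simp), Bool.false_eq_true, if_false]
    exact ih (fun u hu => hlow u (by simp [hu])) (fun u hu => hc u (by simp [hu]))

lemma pv_firstVar_least (n : PySem.Dict String String) :
    ∀ (vs : List String) (j0 : Nat) (hj : j0 < vs.length),
      (∀ v ∈ vs, PySem.Str.lower v = v) →
      n.contains vs[j0] = true → (∀ j (hlt : j < j0), n.contains (vs[j]'(by omega)) = false) →
      pvFirstVar n vs = some (n.getD vs[j0] "") := by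
  intro vs
  induction vs with
  | nil => intro j0 hj; exact absurd hj (by simp)
  | cons v vs ih =>
    intro j0 hj hlow hc hmin
    have hv := hlow v (by simp)
    by_cases h0 : j0 = 0
    · subst h0
      simp only [List.getElem_cons_zero] at hc ⊢
      simp [pvFirstVar, hv, hc]
    · have hj0 : 0 < j0 := Nat.pos_of_ne_zero h0
      have hcv : n.contains v = false := by simpa using hmin 0 hj0
      simp only [pvFirstVar, hv, hcv, Bool.false_eq_true, if_false]
      obtain ⟨k, rfl⟩ : ∃ k, j0 = k + 1 := ⟨j0 - 1, by omega⟩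
      have hres := ih k (by simpa using hj) (fun u hu => hlow u (by simp [hu]))
        (by simpa using hc) (fun j hltj => by simpa using hmin (j + 1) (by omega))
      simpa using hres

-- the per-field equality between A's inner scan and B's per-field state
lemma pv_field_eq (headers : List String) (fv : String × List String) (hfv : fv ∈ pvTable) :
    pvFirstVar (pvNormDict headers) fv.2 = (pvView fv.1 headers none).map (·.2) := by
  have hinv := pv_inv_holds fv hfv headers
  have hlow : ∀ v ∈ fv.2, PySem.Str.lower v = v := pv_lower_var fv hfv
  unfold pvInv at hinv
  rcases hv : pvView fv.1 headers none with _ | iw <;> simp only [hv] at hinv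
  · refine pv_firstVar_none _ fv.2 hlow (fun v hvm => ?_)
    obtain ⟨j, hj, rfl⟩ := List.mem_iff_getElem.1 hvm
    exact hinv j hj
  · obtain ⟨j, hj, h1, h2, h3⟩ := hinv
    rw [pv_firstVar_least _ fv.2 j hj hlow
      (by rw [PySem.Dict.contains_eq_isSome_get?, h2]; rfl)
      (fun k hk => h3 k (by omega) hk)]
    rw [PySem.Dict.getD_of_get?_eq_some _ "" h2]
    rfl

-- ===== VERDICT (by name: the statement is the Claim_ definition above) =====
theorem auto_detect_column_mapping_py_spec : Claim_equal_auto_detect_column_mapping_py := by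
  intro headers _
  unfold Spec_auto_detect_column_mapping_py
  simp only [auto_detect_column_mapping_py, auto_detect_column_mapping_py_alt]
  congr 1
  rw [pv_fields_eq, List.foldl_map]
  apply PySem.List.foldl_congr_mem
  intro m fv hfv
  rw [pv_get?_foldl_stepB fv.1 headers PySem.Dict.empty, PySem.Dict.get?_empty,
    pv_field_eq headers fv hfv]
  cases pvView fv.1 headers none <;> rfl
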